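-- pv_equiv track=rewrite | github.com/jolaf/radiochronicle | RCProcess.py | preSortFiles
-- ===== SOURCE A (Python) =====
-- from typing import cast, Any, Callable, ClassVar, Final, FrozenSet, Iterable, Iterator, Mapping, NoReturn, Optional, Sequence, Tuple, Type, TypeVar
--
-- def preSortFiles(files: Iterable[Tuple[str, str]], startTime: str, endTime: str) -> Iterator[Tuple[str, str]]:
--     assert startTime <= endTime
--     started = False
--     prev: Optional[Tuple[str, str]] = None
--     for (time, fileName) in sorted(files):
--         if not started:
--             if time >= startTime:
--                 if time > startTime and prev:
--                     yield prev
--                 started = True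
--             else:
--                 prev = (time, fileName)
--         if started:
--             if time <= endTime:
--                 yield (time, fileName)
--             else:
--                 return
-- ===== SOURCE B (Python) =====
-- def preSortFiles(files, startTime, endTime):
--     assert startTime <= endTime
--     s = sorted(files)
--     before = [p for p in s if p[0] < startTime]
--     after = [p for p in s if p[0] >= startTime]
--     if before and after and after[0][0] > startTime:
--         yield before[-1]
--     yield from (p for p in after if p[0] <= endTime)
-- ===== Notes on version B (the rewrite author's own statement) =====
-- stated objective: simpler
-- what changed: Replaced the stateful single-pass scan (started flag plus prev accumulator with early return) by a declarative partition of the sorted list into before/after startTime, yielding before[-1] when the first in-range time is strictly past startTime and then the after-part filtered to endTime.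
import Mathlib
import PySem

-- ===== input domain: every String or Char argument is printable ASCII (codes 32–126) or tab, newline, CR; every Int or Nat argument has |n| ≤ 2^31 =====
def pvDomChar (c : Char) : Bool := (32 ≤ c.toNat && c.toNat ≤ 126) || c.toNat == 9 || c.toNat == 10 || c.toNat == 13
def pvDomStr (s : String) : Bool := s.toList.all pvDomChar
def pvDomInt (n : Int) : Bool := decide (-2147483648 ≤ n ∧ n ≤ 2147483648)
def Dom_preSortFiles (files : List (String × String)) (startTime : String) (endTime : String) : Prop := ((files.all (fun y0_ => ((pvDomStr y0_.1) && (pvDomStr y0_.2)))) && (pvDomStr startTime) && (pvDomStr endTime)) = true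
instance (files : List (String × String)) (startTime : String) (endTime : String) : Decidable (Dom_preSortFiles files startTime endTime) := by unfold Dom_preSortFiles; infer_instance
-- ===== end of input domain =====

-- B replaces A's stateful started/prev scan by a declarative partition of the sorted list
-- into before/after startTime plus filters (objective: simpler).

-- ===== PORT A =====
-- A's loop once `started` is True: yield while time <= endTime, then return.
def preSortTail (endTime : String) : List (String × String) → List (String × String)
  | [] => []
  | (time, fileName) :: rest =>
      if time ≤ endTime then (time, fileName) :: preSortTail endTime rest else []

-- A's loop before `started` becomes True; `prev` is the last element seen with time < startTime.
def preSortLoop (startTime endTime : String) : List (String × String) → Option (String × String) → List (String × String)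
  | [], _ => []
  | (time, fileName) :: rest, prev =>
      if startTime ≤ time then
        (if startTime < time then (match prev with | some p => [p] | none => []) else []) ++
        (if time ≤ endTime then (time, fileName) :: preSortTail endTime rest else [])
      else preSortLoop startTime endTime rest (some (time, fileName))

def preSortFiles (files : List (String × String)) (startTime : String) (endTime : String) : List (String × String) :=
  preSortLoop startTime endTime (PySem.List.sorted2 files Prod.fst Prod.snd) none

-- ===== PORT B =====
def preSortFiles_alt (files : List (String × String)) (startTime : String) (endTime : String) : List (String × String) :=
  let s := PySem.List.sorted2 files Prod.fst Prod.snd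
  let before := s.filter (fun p => decide (p.1 < startTime))
  let after := s.filter (fun p => decide (startTime ≤ p.1))
  (match before.getLast?, after.head? with
   | some q, some p => if startTime < p.1 then [q] else []
   | _, _ => []) ++ after.filter (fun p => decide (p.1 ≤ endTime))

-- ===== PRECONDITION & SPEC =====
-- A's `assert startTime <= endTime` raises AssertionError when startTime > endTime.
def Pre_preSortFiles (files : List (String × String)) (startTime : String) (endTime : String) : Prop :=
  startTime.toList ≤ endTime.toList  -- Python's startTime <= endTime (code-point lexicographic)
instance (files : List (String × String)) (startTime : String) (endTime : String) : Decidable (Pre_preSortFiles files startTime endTime) := by unfold Pre_preSortFiles; infer_instance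

def pvWitness_preSortFiles : (List (String × String)) × String × String :=
  ([("10", "a.wav"), ("12", "b.wav")], "11", "13")

def Spec_preSortFiles (files : List (String × String)) (startTime : String) (endTime : String) (out : List (String × String)) : Prop := out = preSortFiles_alt files startTime endTime
instance (files : List (String × String)) (startTime : String) (endTime : String) (out : List (String × String)) : Decidable (Spec_preSortFiles files startTime endTime out) := by unfold Spec_preSortFiles; infer_instance

-- ===== CLAIM (what is proved, stated in full; the proofs are below) =====
def Claim_equal_preSortFiles : Prop := ∀ (files : List (String × String)) (startTime : String) (endTime : String), Dom_preSortFiles files startTime endTime → Pre_preSortFiles files startTime endTime → Spec_preSortFiles files startTime endTime (preSortFiles files startTime endTime)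

-- ===== LEMMAS AND PROOFS =====

-- Once started, A's loop is takeWhile, which on a time-sorted list is filter.
theorem preSortTail_eq_filter (endTime : String) (l : List (String × String))
    (h : l.Pairwise (fun a b => a.1 ≤ b.1)) :
    preSortTail endTime l = l.filter (fun p => decide (p.1 ≤ endTime)) := by
  induction l with
  | nil => rfl
  | cons a rest ih =>
    obtain ⟨h1, h2⟩ := List.pairwise_cons.1 h
    obtain ⟨t, f⟩ := a
    by_cases ht : t ≤ endTime
    · rw [preSortTail, if_pos ht, ih h2,
        List.filter_cons_of_pos (by exact decide_eq_true ht)]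
    · rw [preSortTail, if_neg ht,
        List.filter_cons_of_neg (by exact fun hc => ht (of_decide_eq_true hc))]
      refine (List.filter_eq_nil_iff.2 ?_).symm
      intro p hp
      simp only [decide_eq_true_eq]
      exact fun hle => ht (le_trans (h1 p hp) hle)

theorem getLast?_cons_or {α : Type} (a : α) (m : List α) (p : Option α) :
    ((a :: m).getLast?).or p = ((m.getLast?).or (some a)).or p := by
  cases m with
  | nil => simp
  | cons b m' =>
    rw [List.getLast?_cons_cons]
    obtain ⟨y, hy⟩ := Option.isSome_iff_exists.1 (by simp [List.getLast?_isSome] : (b :: m').getLast?.isSome = true)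
    simp [hy]

-- A's pre-start loop, on a time-sorted list, computes B's partition-based value.
theorem preSortLoop_eq (startTime endTime : String) (l : List (String × String))
    (h : l.Pairwise (fun a b => a.1 ≤ b.1)) :
    ∀ prev, preSortLoop startTime endTime l prev =
      (match ((l.filter (fun p => decide (p.1 < startTime))).getLast?).or prev,
             (l.filter (fun p => decide (startTime ≤ p.1))).head? with
       | some q, some p => if startTime < p.1 then [q] else []
       | _, _ => []) ++
      (l.filter (fun p => decide (startTime ≤ p.1))).filter (fun p => decide (p.1 ≤ endTime)) := by
  induction l with
  | nil =>
    intro prev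
    cases prev <;> rfl
  | cons a rest ih =>
    intro prev
    obtain ⟨h1, h2⟩ := List.pairwise_cons.1 h
    obtain ⟨t, f⟩ := a
    by_cases hst : startTime ≤ t
    · -- first element already at or past startTime: the before-part of the tail is empty
      have hbefore : rest.filter (fun p => decide (p.1 < startTime)) = [] := by
        rw [List.filter_eq_nil_iff]
        intro p hp
        simp only [decide_eq_true_eq, not_lt]
        exact le_trans hst (h1 p hp)
      have hafter : rest.filter (fun p => decide (startTime ≤ p.1)) = rest := by
        rw [List.filter_eq_self]
        intro p hp
        simp only [decide_eq_true_eq]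
        exact le_trans hst (h1 p hp)
      have htail : (if t ≤ endTime then (t, f) :: preSortTail endTime rest else []) =
          ((t, f) :: rest).filter (fun p => decide (p.1 ≤ endTime)) := by
        by_cases ht : t ≤ endTime
        · rw [if_pos ht, preSortTail_eq_filter endTime rest h2,
            List.filter_cons_of_pos (by exact decide_eq_true ht)]
        · rw [if_neg ht,
            List.filter_cons_of_neg (by exact fun hc => ht (of_decide_eq_true hc))]
          refine (List.filter_eq_nil_iff.2 ?_).symm
          intro p hp
          simp only [decide_eq_true_eq]
          exact fun hle => ht (le_trans (h1 p hp) hle)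
      cases prev with
      | none =>
        rw [preSortLoop, if_pos hst,
          List.filter_cons_of_neg (by exact fun hc => not_lt.2 hst (of_decide_eq_true hc)),
          List.filter_cons_of_pos (by exact decide_eq_true hst),
          hbefore, hafter, htail, List.getLast?_nil, Option.none_or, List.head?_cons,
          ite_self]
      | some p =>
        rw [preSortLoop, if_pos hst,
          List.filter_cons_of_neg (by exact fun hc => not_lt.2 hst (of_decide_eq_true hc)),
          List.filter_cons_of_pos (by exact decide_eq_true hst),
          hbefore, hafter, htail, List.getLast?_nil, Option.none_or, List.head?_cons]
    · -- first element strictly before startTime: it goes to the before-part, becomes prev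
      have hlt : t < startTime := not_le.1 hst
      cases prev <;>
        rw [preSortLoop, if_neg hst,
          List.filter_cons_of_pos (by exact decide_eq_true hlt),
          List.filter_cons_of_neg (by exact fun hc => hst (of_decide_eq_true hc)),
          ih h2 (some (t, f)), getLast?_cons_or, Option.or_assoc, Option.some_or]

-- sorted2's lexicographic comparator orders first components
theorem lexBefore_true_fst_le (a b : String × String)
    (h : (decide (a.1 < b.1) || (!decide (b.1 < a.1) && decide (a.2 < b.2))) = true) :
    a.1 ≤ b.1 := by
  by_cases h1 : a.1 < b.1
  · exact le_of_lt h1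
  · by_cases h2 : b.1 < a.1
    · rw [decide_eq_false h1, decide_eq_true h2] at h
      simp at h
    · exact not_lt.1 h2

theorem lexBefore_false_fst_ge (a b : String × String)
    (h : (decide (a.1 < b.1) || (!decide (b.1 < a.1) && decide (a.2 < b.2))) = false) :
    b.1 ≤ a.1 := by
  by_cases h1 : a.1 < b.1
  · rw [decide_eq_true h1] at h
    simp at h
  · exact not_lt.1 h1

theorem insertBy_pairwise_fst (before : (String × String) → (String × String) → Bool)
    (hT : ∀ a b, before a b = true → a.1 ≤ b.1)
    (hF : ∀ a b, before a b = false → b.1 ≤ a.1)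
    (x : String × String) (ys : List (String × String))
    (h : ys.Pairwise (fun a b => a.1 ≤ b.1)) :
    (PySem.List.insertBy before x ys).Pairwise (fun a b => a.1 ≤ b.1) := by
  induction ys with
  | nil => simp [PySem.List.insertBy]
  | cons y ys ih =>
    obtain ⟨h1, h2⟩ := List.pairwise_cons.1 h
    by_cases hb : before x y
    · rw [PySem.List.insertBy, if_pos hb]
      refine List.pairwise_cons.2 ⟨?_, h⟩
      intro z hz
      rcases List.mem_cons.1 hz with hzy | hz
      · exact hzy ▸ hT x y hb
      · exact le_trans (hT x y hb) (h1 z hz)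
    · rw [PySem.List.insertBy, if_neg hb]
      refine List.pairwise_cons.2 ⟨?_, ih h2⟩
      intro z hz
      rcases (PySem.List.mem_insertBy _ _ _ _).1 hz with hzx | hz
      · exact hzx ▸ hF x y (by simpa using hb)
      · exact h1 z hz

theorem foldl_insertBy_pairwise_fst (before : (String × String) → (String × String) → Bool)
    (hT : ∀ a b, before a b = true → a.1 ≤ b.1)
    (hF : ∀ a b, before a b = false → b.1 ≤ a.1)
    (xs acc : List (String × String))
    (hacc : acc.Pairwise (fun a b => a.1 ≤ b.1)) :
    (xs.foldl (fun acc x => PySem.List.insertBy before x acc) acc).Pairwise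
      (fun a b => a.1 ≤ b.1) := by
  induction xs generalizing acc with
  | nil => exact hacc
  | cons x xs ih => exact ih _ (insertBy_pairwise_fst before hT hF x acc hacc)

theorem sorted2_pairwise_fst (files : List (String × String)) :
    (PySem.List.sorted2 files Prod.fst Prod.snd).Pairwise (fun a b => a.1 ≤ b.1) := by
  refine foldl_insertBy_pairwise_fst _ ?_ ?_ files [] List.Pairwise.nil
  · exact fun a b hab => lexBefore_true_fst_le a b hab
  · exact fun a b hab => lexBefore_false_fst_ge a b hab

-- ===== VERDICT (by name: the statement is the Claim_ definition above) =====
theorem preSortFiles_spec : Claim_equal_preSortFiles := by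
  intro files startTime endTime _ _
  unfold Spec_preSortFiles preSortFiles preSortFiles_alt
  rw [preSortLoop_eq startTime endTime _ (sorted2_pairwise_fst files) none, Option.or_none]
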